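-- pv_equiv track=rewrite | github.com/qingzhixing/ysyx-course | State.F/F5 支持数列求和的简单处理器/F5.2 实现完整的sCPU/assembler.py | to_raw_format
-- ===== SOURCE A (Python) =====
-- def to_raw_format(hex_vals, line_width=16):
--     """生成 raw 格式文本行列表，支持游程编码"""
--     encoded = []
--     i = 0
--     n = len(hex_vals)
--     while i < n:
--         j = i
--         while j < n and hex_vals[j] == hex_vals[i]:
--             j += 1
--         cnt = j - i
--         if cnt >= 4:
--             encoded.append(f"{hex_vals[i]}*{cnt}")
--         else:
--             encoded.extend([hex_vals[i]] * cnt)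
--         i = j
--     lines = []
--     for k in range(0, len(encoded), line_width):
--         lines.append(" ".join(encoded[k : k + line_width]))
--     return lines
-- ===== SOURCE B (Python) =====
-- def _flush(encoded, v, cnt):
--     if cnt >= 4:
--         encoded.append(f"{v}*{cnt}")
--     elif cnt:
--         encoded.extend([v] * cnt)
--
--
-- def to_raw_format(hex_vals, line_width=16):
--     """Single pass with a (prev, cnt) run accumulator flushed on change,
--     then a chunking comprehension."""
--     encoded = []
--     prev, cnt = None, 0
--     for x in hex_vals:
--         if cnt and x == prev:
--             cnt += 1
--         else:
--             _flush(encoded, prev, cnt)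
--             prev, cnt = x, 1
--     _flush(encoded, prev, cnt)
--     return [" ".join(encoded[k:k + line_width])
--             for k in range(0, len(encoded), line_width)]
-- ===== Notes on version B (the rewrite author's own statement) =====
-- stated objective: idiomatic
-- what changed: Replaces the nested two-pointer while loops (inner loop advancing an index over each run) with a single for-pass maintaining a (prev, cnt) run accumulator that is flushed when the value changes, and replaces the explicit second loop with a chunking list comprehension.
import Mathlib
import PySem

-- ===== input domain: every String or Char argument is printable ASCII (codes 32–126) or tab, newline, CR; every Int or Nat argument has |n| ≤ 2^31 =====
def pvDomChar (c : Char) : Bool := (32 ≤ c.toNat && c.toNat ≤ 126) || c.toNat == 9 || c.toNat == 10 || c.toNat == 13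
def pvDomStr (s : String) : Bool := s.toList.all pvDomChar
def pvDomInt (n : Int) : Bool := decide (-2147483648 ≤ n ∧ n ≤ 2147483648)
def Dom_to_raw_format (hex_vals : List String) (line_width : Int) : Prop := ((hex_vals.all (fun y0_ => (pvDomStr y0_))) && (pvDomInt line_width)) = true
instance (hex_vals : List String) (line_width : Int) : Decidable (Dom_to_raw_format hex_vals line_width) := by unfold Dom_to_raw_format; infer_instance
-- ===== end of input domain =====

-- B replaces A's nested two-pointer while loops by a single pass with a (prev, cnt)
-- run accumulator flushed on value change, and the line loop by a chunking
-- comprehension (objective: idiomatic; same cost).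

-- ===== PORT A =====
-- inner while: `while j < n and hex_vals[j] == hex_vals[i]: j += 1`  (returns the final j;
-- fuel is a totality guard only: n - j bounds the remaining iterations, and fuel = n suffices)
def pvInnerA (hv : List String) (n : Nat) (v : String) (j : Nat) (fuel : Nat) : Nat :=
  match fuel with
  | 0 => j
  | fuel + 1 => if j < n ∧ hv.getD j "" = v then pvInnerA hv n v (j + 1) fuel else j

-- outer while over i; `cnt = j - i`, then append `f"{v}*{cnt}"` or extend by `[v]*cnt`
-- (fuel again only guards totality: i strictly increases each iteration, so fuel = n suffices)
def pvOuterA (hv : List String) (n : Nat) (i : Nat) (encoded : List String) (fuel : Nat) : List String :=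
  match fuel with
  | 0 => encoded
  | fuel + 1 =>
    if i < n then
      pvOuterA hv n (pvInnerA hv n (hv.getD i "") i n)
        (if 4 ≤ pvInnerA hv n (hv.getD i "") i n - i then
           encoded ++ [hv.getD i "" ++ "*" ++ PySem.Int.toStr ((pvInnerA hv n (hv.getD i "") i n - i : Nat) : Int)]
         else encoded ++ List.replicate (pvInnerA hv n (hv.getD i "") i n - i) (hv.getD i "")) fuel
    else encoded

-- second loop: `for k in range(0, len(encoded), line_width): lines.append(" ".join(encoded[k:k+line_width]))`
def pvLinesA (encoded : List String) (line_width : Int) : List String :=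
  (PySem.List.pyRange 0 (encoded.length : Int) line_width).foldl
    (fun lines k =>
      lines ++ [PySem.Str.join " " (PySem.List.slice encoded (some k) (some (k + line_width)))]) []

def to_raw_format (hex_vals : List String) (line_width : Int) : List String :=
  pvLinesA (pvOuterA hex_vals hex_vals.length 0 [] hex_vals.length) line_width

-- ===== PORT B =====
-- `_flush(encoded, v, cnt)`
def pvFlushB (enc : List String) (v : String) (cnt : Nat) : List String :=
  if 4 ≤ cnt then enc ++ [v ++ "*" ++ PySem.Int.toStr (cnt : Int)]
  else if cnt ≠ 0 then enc ++ List.replicate cnt v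
  else enc

-- the single for-pass with (prev, cnt) state; final flush after the loop
def pvScanB (xs : List String) (enc : List String) (prev : String) (cnt : Nat) : List String :=
  match xs with
  | [] => pvFlushB enc prev cnt
  | x :: rest =>
    if cnt ≠ 0 ∧ x = prev then pvScanB rest enc prev (cnt + 1)
    else pvScanB rest (pvFlushB enc prev cnt) x 1

-- the chunking comprehension
def pvLinesB (encoded : List String) (line_width : Int) : List String :=
  (PySem.List.pyRange 0 (encoded.length : Int) line_width).map
    (fun k => PySem.Str.join " " (PySem.List.slice encoded (some k) (some (k + line_width))))

def to_raw_format_alt (hex_vals : List String) (line_width : Int) : List String :=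
  pvLinesB (pvScanB hex_vals [] "" 0) line_width

-- ===== PRECONDITION & SPEC =====
-- Pre_ excludes only line_width = 0, where Python's range(0, len, 0) raises ValueError in A (and in B).
def Pre_to_raw_format (hex_vals : List String) (line_width : Int) : Prop := line_width ≠ 0
instance (hex_vals : List String) (line_width : Int) : Decidable (Pre_to_raw_format hex_vals line_width) := by unfold Pre_to_raw_format; infer_instance

def pvWitness_to_raw_format : List String × Int := (["a", "a", "a", "a", "b", "c"], 2)

def Spec_to_raw_format (hex_vals : List String) (line_width : Int) (out : List String) : Prop := out = to_raw_format_alt hex_vals line_width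
instance (hex_vals : List String) (line_width : Int) (out : List String) : Decidable (Spec_to_raw_format hex_vals line_width out) := by unfold Spec_to_raw_format; infer_instance

-- ===== CLAIM (what is proved, stated in full; the proofs are below) =====
def Claim_equal_to_raw_format : Prop := ∀ (hex_vals : List String) (line_width : Int), Dom_to_raw_format hex_vals line_width → Pre_to_raw_format hex_vals line_width → Spec_to_raw_format hex_vals line_width (to_raw_format hex_vals line_width)

-- ===== LEMMAS AND PROOFS =====

-- reference run-length encoding of the whole list, by runs
def encRuns : List String → List String
  | [] => []
  | x :: xs =>
    (if 4 ≤ (xs.takeWhile (fun y => y == x)).length + 1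
     then [x ++ "*" ++ PySem.Int.toStr (((xs.takeWhile (fun y => y == x)).length + 1 : Nat) : Int)]
     else List.replicate ((xs.takeWhile (fun y => y == x)).length + 1) x)
      ++ encRuns (xs.dropWhile (fun y => y == x))
termination_by l => l.length
decreasing_by
  have := List.length_dropWhile_le (fun y => y == x) xs
  simp; omega

theorem dropWhile_eq_drop_tw (p : String → Bool) (l : List String) :
    l.dropWhile p = l.drop (l.takeWhile p).length := by
  have h : List.drop (l.takeWhile p).length (l.takeWhile p ++ l.dropWhile p) = l.dropWhile p :=
    List.drop_left
  rw [List.takeWhile_append_dropWhile] at h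
  exact h.symm

theorem encRuns_cons (x : String) (xs : List String) :
    encRuns (x :: xs)
      = (if 4 ≤ (xs.takeWhile (fun y => y == x)).length + 1
         then [x ++ "*" ++ PySem.Int.toStr (((xs.takeWhile (fun y => y == x)).length + 1 : Nat) : Int)]
         else List.replicate ((xs.takeWhile (fun y => y == x)).length + 1) x)
        ++ encRuns (xs.dropWhile (fun y => y == x)) := by
  rw [encRuns.eq_def]

theorem pvInnerA_spec (hv : List String) (v : String) (fuel : Nat) :
    ∀ (j : Nat), hv.length ≤ j + fuel →
      pvInnerA hv hv.length v j fuel = j + ((hv.drop j).takeWhile (fun y => y == v)).length := by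
  induction fuel with
  | zero =>
    intro j hj
    rw [pvInnerA, List.drop_eq_nil_of_le (by omega)]
    simp
  | succ fuel ih =>
    intro j hj
    rw [pvInnerA]
    split
    · rename_i h
      obtain ⟨hjn, hv'⟩ := h
      rw [List.drop_eq_getElem_cons hjn]
      rw [List.getD_eq_getElem hv "" hjn] at hv'
      simp [hv']
      have := ih (j + 1) (by omega)
      omega
    · rename_i h
      by_cases hjn : j < hv.length
      · have hne : ¬ hv.getD j "" = v := fun hc => h ⟨hjn, hc⟩
        rw [List.getD_eq_getElem hv "" hjn] at hne
        rw [List.drop_eq_getElem_cons hjn]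
        simp [hne]
      · rw [List.drop_eq_nil_of_le (by omega)]
        simp

theorem pvOuterA_spec (hv : List String) (fuel : Nat) :
    ∀ (i : Nat) (enc : List String), hv.length ≤ i + fuel →
      pvOuterA hv hv.length i enc fuel = enc ++ encRuns (hv.drop i) := by
  induction fuel with
  | zero =>
    intro i enc hi
    rw [pvOuterA, List.drop_eq_nil_of_le (by omega)]
    simp [encRuns]
  | succ fuel ih =>
    intro i enc hi
    rw [pvOuterA]
    split
    · rename_i h
      have hvv : hv.getD i "" = hv[i] := List.getD_eq_getElem hv "" h
      have hdrop : hv.drop i = hv[i] :: hv.drop (i + 1) := List.drop_eq_getElem_cons h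
      have hinner := pvInnerA_spec hv (hv.getD i "") hv.length i (by omega)
      rw [hdrop, List.takeWhile_cons] at hinner
      simp only [hvv, beq_self_eq_true, if_true, List.length_cons] at hinner
      rw [hvv]
      set t := ((hv.drop (i + 1)).takeWhile (fun y => y == hv[i])).length with ht
      rw [hinner]
      have hcnt : i + (t + 1) - i = t + 1 := by omega
      rw [hcnt]
      have hdw : hv.drop (i + (t + 1)) = (hv.drop (i + 1)).dropWhile (fun y => y == hv[i]) := by
        rw [dropWhile_eq_drop_tw, ← ht, List.drop_drop]
        congr 1
        omega
      rw [ih (i + (t + 1)) _ (by omega), hdw]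
      conv_rhs => rw [hdrop, encRuns_cons]
      rw [← ht]
      split <;> simp
    · rename_i h
      rw [List.drop_eq_nil_of_le (by omega)]
      simp [encRuns]

theorem pvFlushB_pos (enc : List String) (v : String) (t : Nat) :
    pvFlushB enc v (1 + t)
      = enc ++ (if 4 ≤ t + 1 then [v ++ "*" ++ PySem.Int.toStr ((t + 1 : Nat) : Int)]
                else List.replicate (t + 1) v) := by
  unfold pvFlushB
  rw [Nat.add_comm 1 t]
  split
  · rfl
  · simp

theorem pvScanB_spec (xs : List String) (enc : List String) (v : String) (cnt : Nat)
    (h : 1 ≤ cnt) :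
    pvScanB xs enc v cnt
      = pvFlushB enc v (cnt + ((xs.takeWhile (fun y => y == v)).length))
        ++ encRuns (xs.dropWhile (fun y => y == v)) := by
  induction xs generalizing enc v cnt with
  | nil => simp [pvScanB, encRuns]
  | cons x rest ih =>
    rw [pvScanB]
    by_cases hx : x = v
    · rw [if_pos ⟨by omega, hx⟩, ih enc v (cnt + 1) (by omega)]
      rw [List.takeWhile_cons, List.dropWhile_cons]
      simp only [hx, beq_self_eq_true, if_true, cond_true, List.length_cons]
      have : cnt + 1 + (rest.takeWhile (fun y => y == v)).length
           = cnt + ((rest.takeWhile (fun y => y == v)).length + 1) := by omega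
      rw [this]
    · have hxb : (x == v) = false := by simp [hx]
      rw [if_neg (by simp [hx])]
      rw [ih (pvFlushB enc v cnt) x 1 (by omega)]
      rw [List.takeWhile_cons, List.dropWhile_cons]
      simp only [hxb, Bool.false_eq_true, if_false, List.length_nil, Nat.add_zero]
      rw [pvFlushB_pos]
      conv_rhs => rw [encRuns_cons]
      simp only [List.length_nil, Nat.add_zero, List.append_assoc]

theorem pvScanB_top (hv : List String) : pvScanB hv [] "" 0 = encRuns hv := by
  cases hv with
  | nil => simp [pvScanB, pvFlushB, encRuns]
  | cons x rest =>
    rw [pvScanB, if_neg (by simp)]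
    have hflush0 : pvFlushB [] "" 0 = [] := by simp [pvFlushB]
    rw [hflush0, pvScanB_spec rest [] x 1 (by omega), pvFlushB_pos]
    conv_rhs => rw [encRuns_cons]
    simp

theorem pvLines_eq (encoded : List String) (w : Int) :
    pvLinesA encoded w = pvLinesB encoded w := by
  unfold pvLinesA pvLinesB
  rw [PySem.List.foldl_append_singleton_eq_map]
  simp

-- ===== VERDICT (by name: the statement is the Claim_ definition above) =====
theorem to_raw_format_spec : Claim_equal_to_raw_format := by
  intro hex_vals line_width _ _
  unfold Spec_to_raw_format to_raw_format to_raw_format_alt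
  rw [pvOuterA_spec hex_vals hex_vals.length 0 [] (by omega), List.drop_zero, List.nil_append,
      pvScanB_top, pvLines_eq]
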